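-- pv_equiv track=rewrite | github.com/kodareef5/sha256-probe | q5_alternative_attacks/gpu_carry_extraction.py | extract_carries
-- ===== SOURCE A (Python) =====
-- def extract_carries(a, b, N):
--     """Extract carry bits from a + b (mod 2^N).
--     Returns list of N-1 carry bits (carry into positions 1..N-1).
--     """
--     carries = []
--     c = 0
--     for bit in range(N):
--         ab = ((a >> bit) & 1) + ((b >> bit) & 1) + c
--         c = ab >> 1
--         if bit < N - 1:
--             carries.append(c)
--     return carries
-- ===== SOURCE B (Python) =====
-- def extract_carries(a, b, N):
--     """Extract carry bits from a + b (mod 2^N).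
--     Returns list of N-1 carry bits (carry into positions 1..N-1).
--     """
--     x = ((a + b) ^ a) ^ b          # full-adder identity: bit i of x is the carry into position i
--     return [(x >> i) & 1 for i in range(1, N)]
-- ===== Notes on version B (the rewrite author's own statement) =====
-- stated objective: faster
-- what changed: Replaces the sequential per-bit carry-chain loop (two shifts, two masks and an add of full-width ints per bit) by the closed-form carry word x = ((a+b)^a)^b computed with three big-int ops, from which each carry is read off independently as (x>>i)&1.
import Mathlib
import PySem

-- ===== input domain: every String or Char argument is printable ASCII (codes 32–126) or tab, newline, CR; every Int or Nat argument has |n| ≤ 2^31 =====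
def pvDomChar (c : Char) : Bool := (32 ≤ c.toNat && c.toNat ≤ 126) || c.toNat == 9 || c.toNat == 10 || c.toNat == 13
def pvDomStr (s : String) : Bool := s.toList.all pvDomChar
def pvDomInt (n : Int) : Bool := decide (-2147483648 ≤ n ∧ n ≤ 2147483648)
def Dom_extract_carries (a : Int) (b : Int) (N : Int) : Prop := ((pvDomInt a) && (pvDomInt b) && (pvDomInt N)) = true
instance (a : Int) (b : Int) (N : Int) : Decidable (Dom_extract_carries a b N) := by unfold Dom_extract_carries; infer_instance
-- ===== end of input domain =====

-- B replaces A's sequential per-bit carry-chain loop by the closed-form carry word ((a+b)^a)^b, reading each carry off independently.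

-- ===== PORT A =====
-- A: loop over bits 0..N-1 carrying state (carries, c); append c while bit < N-1.
def extract_carries (a : Int) (b : Int) (N : Int) : List Int :=
  ((PySem.List.pyRange 0 N).foldl
    (fun (st : List Int × Int) bit =>
      let ab := PySem.Int.band (a >>> bit.toNat) 1 + PySem.Int.band (b >>> bit.toNat) 1 + st.2
      let c := ab >>> (1 : Nat)
      (if bit < N - 1 then st.1 ++ [c] else st.1, c))
    ([], 0)).1

-- ===== PORT B =====
-- B: x = ((a+b)^a)^b, then [(x >> i) & 1 for i in range(1, N)].
def extract_carries_alt (a : Int) (b : Int) (N : Int) : List Int :=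
  let x := PySem.Int.bxor (PySem.Int.bxor (a + b) a) b
  (PySem.List.pyRange 1 N).map (fun i => PySem.Int.band (x >>> i.toNat) 1)

-- ===== PRECONDITION & SPEC =====
def Spec_extract_carries (a : Int) (b : Int) (N : Int) (out : List Int) : Prop := out = extract_carries_alt a b N
instance (a : Int) (b : Int) (N : Int) (out : List Int) : Decidable (Spec_extract_carries a b N out) := by unfold Spec_extract_carries; infer_instance

-- ===== CLAIM (what is proved, stated in full; the proofs are below) =====
def Claim_equal_extract_carries : Prop := ∀ (a : Int) (b : Int) (N : Int), Dom_extract_carries a b N → Spec_extract_carries a b N (extract_carries a b N)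

-- ===== LEMMAS AND PROOFS =====

-- bit i of x (Python (x >> i) & 1)
def pvBit (x : Int) (i : Nat) : Int := x / 2 ^ i % 2

-- A's carry recurrence
def pvCarry (a b : Int) : Nat → Int
  | 0 => 0
  | i + 1 => (pvBit a i + pvBit b i + pvCarry a b i) / 2

lemma pv_band_shift (x : Int) (k : Nat) : PySem.Int.band (x >>> k) 1 = pvBit x k := by
  rw [PySem.Int.band_one, PySem.Int.mod_eq_emod_of_pos (by norm_num), Int.shiftRight_eq_div_pow]
  simp [pvBit]

lemma pv_bxor_emod_two (u v : Int) : PySem.Int.bxor u v % 2 = (u + v) % 2 := by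
  have h1 : (u.toNat ^^^ v.toNat) % 2 = (u.toNat + v.toNat) % 2 := Nat.xor_mod_two_eq
  have h2 : (u.toNat ^^^ (-v - 1).toNat) % 2 = (u.toNat + (-v - 1).toNat) % 2 := Nat.xor_mod_two_eq
  have h3 : ((-u - 1).toNat ^^^ v.toNat) % 2 = ((-u - 1).toNat + v.toNat) % 2 := Nat.xor_mod_two_eq
  have h4 : ((-u - 1).toNat ^^^ (-v - 1).toNat) % 2 = ((-u - 1).toNat + (-v - 1).toNat) % 2 := Nat.xor_mod_two_eq
  unfold PySem.Int.bxor
  split_ifs <;> omega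

lemma pv_bxor_ediv_two (u v : Int) : PySem.Int.bxor u v / 2 = PySem.Int.bxor (u / 2) (v / 2) := by
  unfold PySem.Int.bxor
  split_ifs <;>
  first
  | omega
  | (rw [show (u / 2).toNat = u.toNat / 2 from by omega,
         show (v / 2).toNat = v.toNat / 2 from by omega, ← Nat.xor_div_two]; omega)
  | (rw [show (u / 2).toNat = u.toNat / 2 from by omega,
         show (-(v / 2) - 1).toNat = (-v - 1).toNat / 2 from by omega, ← Nat.xor_div_two]; omega)
  | (rw [show (-(u / 2) - 1).toNat = (-u - 1).toNat / 2 from by omega,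
         show (v / 2).toNat = v.toNat / 2 from by omega, ← Nat.xor_div_two]; omega)
  | (rw [show (-(u / 2) - 1).toNat = (-u - 1).toNat / 2 from by omega,
         show (-(v / 2) - 1).toNat = (-v - 1).toNat / 2 from by omega, ← Nat.xor_div_two]; omega)

lemma pv_bxor_ediv_pow (u v : Int) (i : Nat) :
    PySem.Int.bxor u v / 2 ^ i = PySem.Int.bxor (u / 2 ^ i) (v / 2 ^ i) := by
  induction i generalizing u v with
  | zero => simp
  | succ i ih =>
    have h : ∀ y : Int, y / 2 ^ (i + 1) = y / 2 ^ i / 2 := by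
      intro y
      rw [Int.ediv_ediv_of_nonneg (by positivity), ← pow_succ]
    rw [h, h, h, ih, pv_bxor_ediv_two]

lemma pv_bit_bxor (u v : Int) (i : Nat) :
    pvBit (PySem.Int.bxor u v) i = (pvBit u i + pvBit v i) % 2 := by
  unfold pvBit
  rw [pv_bxor_ediv_pow, pv_bxor_emod_two]
  omega

lemma pv_mod_double (x p : Int) (hp : 0 < p) : x % (p * 2) = x % p + p * (x / p % 2) := by
  have e1 := Int.mul_ediv_add_emod x (p * 2)
  have e4 : x / (p * 2) = x / p / 2 := (Int.ediv_ediv_of_nonneg (le_of_lt hp)).symm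
  have e2 := Int.mul_ediv_add_emod x p
  have e3 := Int.mul_ediv_add_emod (x / p) 2
  rw [e4] at e1
  linear_combination e1 - e2 - p * e3

lemma pv_div_double (S r p : Int) (hp : 0 < p) (h0 : 0 ≤ r) (h1 : r < p) :
    (p * S + r) / (p * 2) = S / 2 := by
  have e3 := Int.mul_ediv_add_emod S 2
  have hm0 : 0 ≤ S % 2 := Int.emod_nonneg _ (by norm_num)
  have hm1 : S % 2 < 2 := Int.emod_lt_of_pos _ (by norm_num)
  have key : p * S + r = (p * (S % 2) + r) + (p * 2) * (S / 2) := by linear_combination (-p) * e3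
  rw [key, Int.add_mul_ediv_left _ _ (by positivity : (0:Int) < p * 2).ne']
  have hz : (p * (S % 2) + r) / (p * 2) = 0 :=
    Int.ediv_eq_zero_of_lt (by nlinarith) (by nlinarith)
  omega

lemma pv_carry_closed (a b : Int) (i : Nat) :
    pvCarry a b i = (a % 2 ^ i + b % 2 ^ i) / 2 ^ i := by
  induction i with
  | zero => simp [pvCarry]
  | succ i ih =>
    have hp : (0:Int) < 2 ^ i := by positivity
    have hq0 : 0 ≤ (a % 2 ^ i + b % 2 ^ i) % 2 ^ i := Int.emod_nonneg _ hp.ne'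
    have hq1 : (a % 2 ^ i + b % 2 ^ i) % 2 ^ i < 2 ^ i := Int.emod_lt_of_pos _ hp
    have eq : pvCarry a b (i + 1) = (pvBit a i + pvBit b i + pvCarry a b i) / 2 := rfl
    rw [eq, ih, pow_succ, pv_mod_double a _ hp, pv_mod_double b _ hp]
    have key : a % 2 ^ i + 2 ^ i * (a / 2 ^ i % 2) + (b % 2 ^ i + 2 ^ i * (b / 2 ^ i % 2)) =
        2 ^ i * (a / 2 ^ i % 2 + b / 2 ^ i % 2 + (a % 2 ^ i + b % 2 ^ i) / 2 ^ i) +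
          (a % 2 ^ i + b % 2 ^ i) % 2 ^ i := by
      linear_combination -Int.mul_ediv_add_emod (a % 2 ^ i + b % 2 ^ i) (2 ^ i)
    rw [key, pv_div_double _ _ _ hp hq0 hq1]
    rfl

lemma pv_carry_bounds (a b : Int) (i : Nat) :
    0 ≤ (a % 2 ^ i + b % 2 ^ i) / 2 ^ i ∧ (a % 2 ^ i + b % 2 ^ i) / 2 ^ i ≤ 1 := by
  have hp : (0:Int) < 2 ^ i := by positivity
  have ha1 := Int.emod_nonneg a hp.ne'
  have ha2 := Int.emod_lt_of_pos a hp
  have hb1 := Int.emod_nonneg b hp.ne'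
  have hb2 := Int.emod_lt_of_pos b hp
  constructor
  · exact Int.ediv_nonneg (by omega) (by omega)
  · have h2 : (a % 2 ^ i + b % 2 ^ i) / 2 ^ i < 2 := by
      rw [Int.ediv_lt_iff_lt_mul hp]
      omega
    omega

lemma pv_sum_ediv (a b : Int) (i : Nat) :
    (a + b) / 2 ^ i = a / 2 ^ i + b / 2 ^ i + (a % 2 ^ i + b % 2 ^ i) / 2 ^ i := by
  have hp : (0:Int) < 2 ^ i := by positivity
  have e1 := Int.mul_ediv_add_emod a (2 ^ i)
  have e2 := Int.mul_ediv_add_emod b (2 ^ i)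
  have key : a + b = (a % 2 ^ i + b % 2 ^ i) + 2 ^ i * (a / 2 ^ i + b / 2 ^ i) := by
    linear_combination -e1 - e2
  rw [key, Int.add_mul_ediv_left _ _ hp.ne']
  ring

-- the heart: bit i of ((a+b)^a)^b is the carry into position i
lemma pv_main (a b : Int) (i : Nat) :
    pvBit (PySem.Int.bxor (PySem.Int.bxor (a + b) a) b) i = pvCarry a b i := by
  rw [pv_bit_bxor, pv_bit_bxor, pv_carry_closed]
  have hs := pv_sum_ediv a b i
  have hb := pv_carry_bounds a b i
  unfold pvBit
  omega

lemma pv_loopA (a b N : Int) (n : Nat) :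
    (((List.range n).map (fun k => Int.ofNat k)).foldl
      (fun (st : List Int × Int) bit =>
        let ab := PySem.Int.band (a >>> bit.toNat) 1 + PySem.Int.band (b >>> bit.toNat) 1 + st.2
        let c := ab >>> (1 : Nat)
        (if bit < N - 1 then st.1 ++ [c] else st.1, c))
      ([], 0)) =
    (((List.range n).filter (fun (k : Nat) => decide ((k : Int) < N - 1))).map
        (fun k => pvCarry a b (k + 1)),
      pvCarry a b n) := by
  induction n with
  | zero => simp [pvCarry]
  | succ n ih =>
    rw [List.range_succ, List.map_append, List.foldl_append, ih, List.filter_append,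
      List.map_append]
    have hc : (PySem.Int.band (a >>> ((n : Nat) : Int)) 1 +
        PySem.Int.band (b >>> ((n : Nat) : Int)) 1 + pvCarry a b n) >>> (1 : Nat) =
        pvCarry a b (n + 1) := by
      rw [Int.shiftRight_natCast_right, Int.shiftRight_natCast_right,
        Int.shiftRight_eq_div_pow]
      simp [pv_band_shift, pvCarry]
    simp only [List.filter_cons, List.filter_nil]
    by_cases h : (n : Int) < N - 1 <;> simp [h] <;> simpa using hc

lemma pv_filter_range (n m : Nat) (h : m ≤ n) :
    (List.range n).filter (fun k => decide (k < m)) = List.range m := by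
  induction n with
  | zero =>
    have : m = 0 := by omega
    simp [this]
  | succ n ih =>
    rw [List.range_succ, List.filter_append]
    by_cases hm : m ≤ n
    · rw [ih hm]
      have hn : ¬ (n < m) := by omega
      simp [hn]
    · have hm' : m = n + 1 := by omega
      subst hm'
      rw [List.filter_eq_self.2 (by intro x hx; simp at hx ⊢; omega)]
      simp [List.range_succ]

-- ===== VERDICT (by name: the statement is the Claim_ definition above) =====
theorem extract_carries_spec : Claim_equal_extract_carries := by
  intro a b N _
  unfold Spec_extract_carries extract_carries extract_carries_alt
  rw [PySem.List.pyRange_of_pos 0 N (by norm_num), PySem.List.pyRange_of_pos 1 N (by norm_num)]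
  have h0 : (if (0:Int) < N then ((N - 0 + 1 - 1) / 1).toNat else 0) = N.toNat := by
    split_ifs <;> omega
  have h1 : (if (1:Int) < N then ((N - 1 + 1 - 1) / 1).toNat else 0) = (N - 1).toNat := by
    split_ifs <;> omega
  rw [h0, h1]
  have hmap : (List.range N.toNat).map (fun (k : Nat) => (0 : Int) + 1 * (k : Int)) =
      (List.range N.toNat).map (fun (k : Nat) => Int.ofNat k) := by
    simp
  simp only [List.map_map]
  rw [hmap, pv_loopA]
  dsimp only
  have hpred : (fun (k : Nat) => decide ((k : Int) < N - 1)) =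
      (fun (k : Nat) => decide (k < (N - 1).toNat)) := by
    funext k
    simp only [decide_eq_decide]
    omega
  rw [hpred, pv_filter_range _ _ (by omega)]
  refine List.map_congr_left ?_
  intro k _
  have hk : ((1 : Int) + 1 * (k : Int)).toNat = k + 1 := by omega
  simp only [Function.comp_apply]
  rw [hk, Int.shiftRight_natCast_right, pv_band_shift, pv_main]
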